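-- pv_equiv track=rewrite | github.com/SinJ5/Aocd | 2019/2019-Day4-B.py | podminka2
-- ===== SOURCE A (Python) =====
-- def podminka2(num):
--     tmp =num
--     lastval= tmp%10
--     tmp= tmp//10
--     same_count=0
--     while tmp>0:
--         val =tmp%10
--         tmp=tmp//10
--         if(val>lastval):
--             return 0
--         if(val==lastval):
--             same_count+=1
--         lastval=val
--     if(same_count>0):
--         return 1
--     return 0
-- ===== SOURCE B (Python) =====
-- def podminka2(num):
--     s = str(num)
--     if list(s) != sorted(s):
--         return 0
--     return 1 if any(a == b for a, b in zip(s, s[1:])) else 0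
-- ===== Notes on version B (the rewrite author's own statement) =====
-- stated objective: simpler
-- what changed: A's right-to-left arithmetic scan with mod/floordiv and a same-digit counter is replaced by a sort/compare over the decimal string (list(s) == sorted(s)) plus an any() over adjacent character pairs.
-- outside the precondition, e.g. on podminka2(-11): A returns 0, B returns 1
import Mathlib
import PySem

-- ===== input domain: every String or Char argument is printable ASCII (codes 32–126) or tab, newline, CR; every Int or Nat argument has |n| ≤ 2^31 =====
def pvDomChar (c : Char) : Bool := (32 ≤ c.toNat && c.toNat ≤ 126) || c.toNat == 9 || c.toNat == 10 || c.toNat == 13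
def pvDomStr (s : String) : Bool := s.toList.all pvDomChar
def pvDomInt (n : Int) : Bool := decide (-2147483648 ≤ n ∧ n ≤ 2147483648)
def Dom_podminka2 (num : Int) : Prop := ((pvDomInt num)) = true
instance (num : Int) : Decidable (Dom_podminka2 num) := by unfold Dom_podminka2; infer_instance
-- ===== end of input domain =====

-- B replaces A's right-to-left arithmetic digit scan with a sort/compare over the decimal
-- string plus an adjacent-pair scan (objective: simpler; same cost).

-- ===== PORT A =====
-- the while loop of A: state (tmp, lastval, same_count)
def podminka2Loop (tmp lastval same_count : Int) : Int :=
  if h : tmp > 0 then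
    let val := PySem.Int.mod tmp 10
    let tmp' := PySem.Int.floordiv tmp 10
    if val > lastval then 0
    else podminka2Loop tmp' val (if val == lastval then same_count + 1 else same_count)
  else
    if same_count > 0 then 1 else 0
termination_by tmp.toNat
decreasing_by
  have h10 : (0:Int) < 10 := by norm_num
  simp only [PySem.Int.floordiv_eq_ediv_of_pos h10]
  omega

def podminka2 (num : Int) : Int :=
  podminka2Loop (PySem.Int.floordiv num 10) (PySem.Int.mod num 10) 0

-- ===== PORT B =====
def podminka2_alt (num : Int) : Int :=
  let s := PySem.Int.toChars num
  if s ≠ PySem.List.sorted s (fun c => c) then 0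
  else if (s.zip s.tail).any (fun p => p.1 == p.2) then 1 else 0

-- ===== PRECONDITION & SPEC =====
-- Pre_ excludes negative numbers, on which A returns a value (always zero): there A's
-- mod/floordiv scan sees no digits while B's string view sees the '-' sign — a corner
-- outside the function's purpose (AoC password digits) where neither behaviour is specified.
def Pre_podminka2 (num : Int) : Prop := 0 ≤ num
instance (num : Int) : Decidable (Pre_podminka2 num) := by unfold Pre_podminka2; infer_instance
def pvWitness_podminka2 : Int := (11)

def Spec_podminka2 (num : Int) (out : Int) : Prop := out = podminka2_alt num
instance (num : Int) (out : Int) : Decidable (Spec_podminka2 num out) := by unfold Spec_podminka2; infer_instance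

-- ===== CLAIM (what is proved, stated in full; the proofs are below) =====
def Claim_equal_podminka2 : Prop := ∀ (num : Int), Dom_podminka2 num → Pre_podminka2 num → Spec_podminka2 num (podminka2 num)

-- ===== LEMMAS AND PROOFS =====

-- A's loop, rephrased over the (little-endian) list of remaining digits
def goA (l : List Int) (lastval same_count : Int) : Int :=
  match l with
  | [] => if same_count > 0 then 1 else 0
  | v :: r => if v > lastval then 0 else goA r v (if v == lastval then same_count + 1 else same_count)

lemma podminka2Loop_eq_goA (m : Nat) :
    ∀ (lv sc : Int), podminka2Loop (m : Int) lv sc = goA ((Nat.digits 10 m).map (Int.ofNat)) lv sc := by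
  induction m using Nat.strong_induction_on with
  | _ m ih =>
    intro lv sc
    rw [podminka2Loop]
    by_cases hm : 0 < m
    · have hgt : ((m : Int) > 0) := by exact_mod_cast hm
      rw [Nat.digits_def' (by norm_num) hm]
      simp only [hgt, dif_pos, List.map_cons, goA]
      have hmod : PySem.Int.mod (m : Int) 10 = ((m % 10 : Nat) : Int) := by
        exact_mod_cast PySem.Int.mod_natCast m 10
      have hdiv : PySem.Int.floordiv (m : Int) 10 = ((m / 10 : Nat) : Int) := by
        exact_mod_cast PySem.Int.floordiv_natCast m 10
      rw [hmod, hdiv, ih (m / 10) (Nat.div_lt_self hm (by norm_num))]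
      rfl
    · have hm0 : m = 0 := by omega
      subst hm0
      simp [goA]

-- the loop's value, characterised by chain conditions on the full digit list
lemma goA_spec : ∀ (l : List Int) (lv sc : Int), 0 ≤ sc →
    goA l lv sc =
      if List.IsChain (fun a b => b ≤ a) (lv :: l) ∧ (0 < sc ∨ ¬ List.IsChain (fun a b => a ≠ b) (lv :: l))
      then 1 else 0 := by
  intro l
  induction l with
  | nil =>
    intro lv sc hsc
    have c1 : List.IsChain (fun a b : Int => b ≤ a) [lv] := List.isChain_singleton lv
    have c2 : List.IsChain (fun a b : Int => a ≠ b) [lv] := List.isChain_singleton lv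
    simp only [goA, c1, c2, not_true, or_false, true_and]
  | cons v r ih =>
    intro lv sc hsc
    simp only [goA]
    by_cases hgt : v > lv
    · have : ¬ (v ≤ lv) := by omega
      simp [List.isChain_cons_cons, this]
    · have hle : v ≤ lv := by omega
      rw [if_neg hgt]
      by_cases heq : v = lv
      · have hbeq : (v == lv) = true := by simp [heq]
        rw [if_pos hbeq, ih v (sc + 1) (by omega)]
        have hne : ¬ (lv ≠ v) := by omega
        simp only [List.isChain_cons_cons (l := r)]
        by_cases hc : List.IsChain (fun a b : Int => b ≤ a) (v :: r) <;>
          simp_all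
      · have hbeq : (v == lv) = false := by simp [heq]
        rw [if_neg (by simp [hbeq]), ih v sc hsc]
        have hne : lv ≠ v := fun h => heq h.symm
        by_cases hc : List.IsChain (fun a b : Int => b ≤ a) (v :: r) <;>
          simp_all [List.isChain_cons_cons]
  
-- "some adjacent pair is equal" ↔ failure of the all-adjacent-distinct chain
lemma zip_any_eq_iff {α : Type} [DecidableEq α] :
    ∀ (xs : List α), (((xs.zip xs.tail).any fun p => p.1 == p.2) = true ↔ ¬ List.IsChain (fun a b => a ≠ b) xs) := by
  intro xs
  induction xs with
  | nil => simp
  | cons a t ih =>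
    cases t with
    | nil => simp
    | cons b r =>
      simp only [List.tail_cons, List.zip_cons_cons, List.any_cons, List.isChain_cons_cons]
      rw [Bool.or_eq_true, beq_iff_eq]
      constructor
      · rintro (h | h)
        · tauto
        · have := (ih).1 h
          tauto
      · intro h
        by_cases hab : a = b
        · left; exact hab
        · right; exact ih.2 (by tauto)

-- chains transfer along a pointwise-equivalent relation on the list's members
lemma isChain_congr_mem {α : Type} {R S : α → α → Prop} :
    ∀ (l : List α), (∀ a ∈ l, ∀ b ∈ l, (R a b ↔ S a b)) →
      (List.IsChain R l ↔ List.IsChain S l) := by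
  intro l
  induction l with
  | nil => simp
  | cons a t ih =>
    intro h
    cases t with
    | nil => simp
    | cons b r =>
      rw [List.isChain_cons_cons, List.isChain_cons_cons,
        h a (by simp) b (by simp),
        ih (fun x hx y hy => h x (by simp [hx]) y (by simp [hy]))]

-- Nat.toDigitsCore writes the base-10 digits most-significant-first
lemma toDigitsCore_eq (m : Nat) : ∀ (f : Nat) (ds : List Char), 0 < m → m ≤ f →
    Nat.toDigitsCore 10 f m ds = ((Nat.digits 10 m).map Nat.digitChar).reverse ++ ds := by
  induction m using Nat.strong_induction_on with
  | _ m ih =>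
    intro f ds hm hf
    cases f with
    | zero => omega
    | succ f' =>
      rw [Nat.toDigitsCore]
      rw [Nat.digits_def' (by norm_num) hm]
      by_cases hq : m / 10 = 0
      · rw [if_pos hq, hq]
        simp
      · rw [if_neg hq,
          ih (m / 10) (Nat.div_lt_self hm (by norm_num)) f' (Nat.digitChar (m % 10) :: ds)
            (by omega) (by have := Nat.div_lt_self hm (show 1 < 10 by norm_num); omega)]
        rw [Nat.digits_def' (by norm_num) (by omega)] at *
        simp
      
lemma toDigits_eq (m : Nat) (hm : 0 < m) :
    Nat.toDigits 10 m = ((Nat.digits 10 m).map Nat.digitChar).reverse := by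
  rw [Nat.toDigits, toDigitsCore_eq m (m + 1) [] hm (by omega)]
  simp

-- digitChar is order- and equality-faithful on digits
lemma digitChar_le_iff : ∀ a < 10, ∀ b < 10, (Nat.digitChar a ≤ Nat.digitChar b ↔ a ≤ b) := by decide
lemma digitChar_eq_iff : ∀ a < 10, ∀ b < 10, (Nat.digitChar a = Nat.digitChar b ↔ a = b) := by decide

-- B on a positive number, characterised by the same chain conditions on the digit list
lemma alt_char (m : Nat) (hm : 0 < m) :
    podminka2_alt (m : Int) =
      if List.IsChain (fun a b : Nat => b ≤ a) (Nat.digits 10 m) ∧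
         ¬ List.IsChain (fun a b : Nat => a ≠ b) (Nat.digits 10 m)
      then 1 else 0 := by
  have hlt : ∀ d ∈ Nat.digits 10 m, d < 10 := fun d hd => Nat.digits_lt_base (by norm_num) hd
  have hchars : PySem.Int.toChars (m : Int) = ((Nat.digits 10 m).map Nat.digitChar).reverse := by
    simp only [PySem.Int.toChars]
    rw [if_neg (by exact_mod_cast Nat.not_lt_zero m), Int.toNat_natCast]
    exact toDigits_eq m hm
  set L := Nat.digits 10 m with hL
  set s : List Char := (L.map Nat.digitChar).reverse with hs
  -- sorted-test ↔ descending chain on L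
  have hsorted : (s = PySem.List.sorted s (fun c => c)) ↔ List.IsChain (fun a b : Nat => b ≤ a) L := by
    constructor
    · intro h
      have hp : s.Pairwise (fun a b : Char => a ≤ b) := by
        rw [h]; exact PySem.List.sorted_pairwise s (fun c => c)
      have hc : s.IsChain (fun a b : Char => a ≤ b) :=
        (List.isChain_iff_pairwise (R := fun a b : Char => a ≤ b)).mpr hp
      rw [hs, List.isChain_reverse, List.isChain_map] at hc
      exact (isChain_congr_mem L (fun a ha b hb => by
        rw [digitChar_le_iff b (hlt b hb) a (hlt a ha)])).mp hc
    · intro h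
      refine (PySem.List.sorted_eq_self_of_pairwise s (fun c => c) ?_).symm
      refine (List.isChain_iff_pairwise (R := fun a b : Char => a ≤ b)).mp ?_
      rw [hs, List.isChain_reverse, List.isChain_map]
      exact (isChain_congr_mem L (fun a ha b hb => by
        rw [digitChar_le_iff b (hlt b hb) a (hlt a ha)])).mpr h
  -- adjacent-equal test ↔ failure of the distinct chain on L
  have hadj : (((s.zip s.tail).any fun p => p.1 == p.2) = true) ↔
      ¬ List.IsChain (fun a b : Nat => a ≠ b) L := by
    rw [zip_any_eq_iff s, hs, List.isChain_reverse, List.isChain_map]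
    exact not_congr (isChain_congr_mem L (fun a ha b hb =>
      not_congr ((digitChar_eq_iff b (hlt b hb) a (hlt a ha)).trans eq_comm)))
  simp only [podminka2_alt, hchars]
  by_cases h1 : List.IsChain (fun a b : Nat => b ≤ a) L
  · rw [if_neg (by simpa using hsorted.mpr h1)]
    by_cases h2 : List.IsChain (fun a b : Nat => a ≠ b) L
    · rw [if_neg (by simp only [hadj]; tauto), if_neg (by tauto)]
    · rw [if_pos (hadj.mpr h2), if_pos (by tauto)]
  · rw [if_pos (by intro hcontra; exact h1 (hsorted.mp hcontra)), if_neg (by tauto)]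

-- A on a positive number, characterised the same way
lemma a_char (m : Nat) (hm : 0 < m) :
    podminka2 (m : Int) =
      if List.IsChain (fun a b : Nat => b ≤ a) (Nat.digits 10 m) ∧
         ¬ List.IsChain (fun a b : Nat => a ≠ b) (Nat.digits 10 m)
      then 1 else 0 := by
  have hmod : PySem.Int.mod (m : Int) 10 = ((m % 10 : Nat) : Int) := by
    exact_mod_cast PySem.Int.mod_natCast m 10
  have hdiv : PySem.Int.floordiv (m : Int) 10 = ((m / 10 : Nat) : Int) := by
    exact_mod_cast PySem.Int.floordiv_natCast m 10
  rw [podminka2, hmod, hdiv, podminka2Loop_eq_goA (m / 10),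
    goA_spec _ _ 0 (by omega)]
  have hfull : ((m % 10 : Nat) : Int) :: ((Nat.digits 10 (m / 10)).map Int.ofNat)
      = (Nat.digits 10 m).map Int.ofNat := by
    rw [Nat.digits_def' (show 1 < 10 by norm_num) hm, List.map_cons]
    rfl
  rw [hfull]
  have hle : List.IsChain (fun a b : Int => b ≤ a) ((Nat.digits 10 m).map Int.ofNat)
      ↔ List.IsChain (fun a b : Nat => b ≤ a) (Nat.digits 10 m) := by
    rw [List.isChain_map]
    exact isChain_congr_mem _ (fun a _ b _ => Int.ofNat_le)
  have hne : List.IsChain (fun a b : Int => a ≠ b) ((Nat.digits 10 m).map Int.ofNat)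
      ↔ List.IsChain (fun a b : Nat => a ≠ b) (Nat.digits 10 m) := by
    rw [List.isChain_map]
    exact isChain_congr_mem _ (fun a _ b _ => not_congr Int.ofNat_inj)
  simp [hle, hne]

-- ===== VERDICT (by name: the statement is the Claim_ definition above) =====
theorem podminka2_spec : Claim_equal_podminka2 := by
  intro num _ hpre
  unfold Spec_podminka2
  obtain ⟨m, rfl⟩ : ∃ m : Nat, num = (m : Int) := ⟨num.toNat, (Int.toNat_of_nonneg hpre).symm⟩
  by_cases hm : 0 < m
  · rw [a_char m hm, alt_char m hm]
  · have : m = 0 := by omega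
    subst this
    have hA : podminka2 ((0:Nat):Int) = 0 := by
      rw [podminka2, show ((0:Nat):Int) = 0 from rfl,
        show PySem.Int.floordiv 0 10 = 0 from by decide,
        show PySem.Int.mod 0 10 = 0 from by decide, podminka2Loop]
      norm_num
    have hB : podminka2_alt ((0:Nat):Int) = 0 := by decide
    rw [hA, hB]
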